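-- pv_equiv track=rewrite | github.com/Nexusprime22/Mobility_and_smart_cities_MAXEL | algos/remove_transitive.py | find_transitive_edges_matrix
-- ===== SOURCE A (Python) =====
-- def find_transitive_edges_matrix(matrix):
--     n = len(matrix)
--     transitive_edges = []
--     for i in range(n):
--         for j in range(n):
--             if matrix[i][j] == 1:
--                 for k in range(n):
--                     if i!=j and j!=k and i!=k and matrix[j][k] == 1 and matrix[i][k] == 1:
--                         transitive_edges.append((i,k))
--                         return transitive_edges
--
--     return transitive_edges
-- ===== SOURCE B (Python) =====
-- def find_transitive_edges_matrix(matrix):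
--     n = len(matrix)
--     rows = []
--     for i in range(n):
--         r = 0
--         for j in range(n):
--             if matrix[i][j] == 1:
--                 r |= 1 << j
--         rows.append(r)
--     for i in range(n):
--         m = rows[i] - (rows[i] & (1 << i))          # candidate j's: drop the self-loop bit
--         while m:
--             rest = m & (m - 1)                      # m with its lowest set bit cleared
--             j = (m - rest).bit_length() - 1         # index of that lowest bit
--             c = rows[i] & rows[j]                   # common successors of i and j
--             c -= c & ((1 << i) | (1 << j))          # k must differ from i and from j
--             if c:
--                 return [(i, (c - (c & (c - 1))).bit_length() - 1)]
--             m = rest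
--     return []
-- ===== Notes on version B (the rewrite author's own statement) =====
-- stated objective: alternative
-- what changed: Encodes each row as an integer bitset once, then finds the first transitive edge with word-level bit arithmetic: candidate j's are peeled off as lowest set bits, the common successors are one AND of two bitsets, and the answer k is the lowest set bit of that word - no inner k-loop at all.
-- outside the precondition, e.g. on find_transitive_edges_matrix([[1, 1, 1], [0, 0, 1], [0]]): A returns [(0, 2)], B raises IndexError
import Mathlib
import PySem

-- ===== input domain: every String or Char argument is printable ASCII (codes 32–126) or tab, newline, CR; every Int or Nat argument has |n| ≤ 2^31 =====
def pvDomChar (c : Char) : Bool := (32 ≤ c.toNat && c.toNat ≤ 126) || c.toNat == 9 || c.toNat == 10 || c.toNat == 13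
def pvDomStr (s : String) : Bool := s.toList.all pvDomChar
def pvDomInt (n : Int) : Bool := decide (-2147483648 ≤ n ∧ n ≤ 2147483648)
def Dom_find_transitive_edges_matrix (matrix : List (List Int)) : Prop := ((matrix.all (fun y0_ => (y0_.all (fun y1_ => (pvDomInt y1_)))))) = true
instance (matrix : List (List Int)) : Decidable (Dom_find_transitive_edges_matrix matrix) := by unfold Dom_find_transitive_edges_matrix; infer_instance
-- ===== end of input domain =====

-- B encodes each row as an integer bitset and finds the first transitive edge by word-level
-- bit arithmetic (lowest-set-bit peeling and one AND for the common successors) instead of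
-- A's three nested scans (objective: alternative algorithmic mechanism, same result).

-- ===== PORT A =====
-- matrix[i][j] for in-range i, j (Pre_ guarantees every access the Pythons perform is in range)
def pvGet (matrix : List (List Int)) (i j : Nat) : Int := (matrix.getD i []).getD j 0

-- 'i!=j and j!=k and i!=k and matrix[j][k] == 1 and matrix[i][k] == 1'
def pvCondA (matrix : List (List Int)) (i j k : Nat) : Bool :=
  decide (i ≠ j) && decide (j ≠ k) && decide (i ≠ k) &&
  decide (pvGet matrix j k = 1) && decide (pvGet matrix i k = 1)

def find_transitive_edges_matrix (matrix : List (List Int)) : List (Int × Int) :=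
  let n := matrix.length
  match (List.range n).findSome? (fun i =>
      (List.range n).findSome? (fun j =>
        if pvGet matrix i j = 1 then
          (List.range n).findSome? (fun k =>
            if pvCondA matrix i j k then some ((i : Int), (k : Int)) else none)
        else none)) with
  | some p => [p]
  | none => []

-- ===== PORT B =====
-- 'r |= 1 << j for each j < n with matrix[i][j] == 1'
def pvMaskRow (matrix : List (List Int)) (n i : Nat) : Nat :=
  (List.range n).foldl (fun r j => if pvGet matrix i j = 1 then r ||| (1 <<< j) else r) 0

-- the 'while m:' loop of B; 'x & ~y'-style bit clearing is written in Source B as x - (x & y),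
-- and 'low.bit_length() - 1' is Nat.size low - 1 (exact for Nat operands)
def pvBitLoop (rows : List Nat) (i : Nat) (m : Nat) : Option (Int × Int) :=
  if hm : m = 0 then none
  else
    let rest := m &&& (m - 1)
    let j := (m - rest).size - 1
    let c0 := rows.getD i 0 &&& rows.getD j 0
    let c := c0 - (c0 &&& ((1 <<< i) ||| (1 <<< j)))
    if c ≠ 0 then some (((i : Nat) : Int), (((c - (c &&& (c - 1))).size - 1 : Nat) : Int))
    else pvBitLoop rows i rest
termination_by m
decreasing_by
  have h1 : m &&& (m - 1) ≤ m - 1 := Nat.and_le_right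
  omega

def find_transitive_edges_matrix_alt (matrix : List (List Int)) : List (Int × Int) :=
  let n := matrix.length
  let rows := (List.range n).map (pvMaskRow matrix n)
  match (List.range n).findSome? (fun i =>
      pvBitLoop rows i (rows.getD i 0 - (rows.getD i 0 &&& (1 <<< i)))) with
  | some p => [p]
  | none => []

-- ===== PRECONDITION & SPEC =====
-- Pre_ excludes ragged matrices (some row shorter than len(matrix)): there the Python
-- programs index past a row's end and in general raise IndexError (A can occasionally
-- return a value early, before ever touching the short row — see claim.json cites).
def Pre_find_transitive_edges_matrix (matrix : List (List Int)) : Prop :=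
  ∀ row ∈ matrix, matrix.length ≤ row.length
instance (matrix : List (List Int)) : Decidable (Pre_find_transitive_edges_matrix matrix) := by
  unfold Pre_find_transitive_edges_matrix; infer_instance

def pvWitness_find_transitive_edges_matrix : List (List Int) :=
  [[0, 1, 1], [0, 0, 1], [0, 0, 0]]

def Spec_find_transitive_edges_matrix (matrix : List (List Int)) (out : List (Int × Int)) : Prop := out = find_transitive_edges_matrix_alt matrix
instance (matrix : List (List Int)) (out : List (Int × Int)) : Decidable (Spec_find_transitive_edges_matrix matrix out) := by unfold Spec_find_transitive_edges_matrix; infer_instance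

-- ===== CLAIM (what is proved, stated in full; the proofs are below) =====
def Claim_equal_find_transitive_edges_matrix : Prop := ∀ (matrix : List (List Int)), Dom_find_transitive_edges_matrix matrix → Pre_find_transitive_edges_matrix matrix → Spec_find_transitive_edges_matrix matrix (find_transitive_edges_matrix matrix)

-- ===== LEMMAS AND PROOFS =====

theorem pv_findSome?_congr {α β : Type} (xs : List α) (f g : α → Option β)
    (h : ∀ x ∈ xs, f x = g x) : xs.findSome? f = xs.findSome? g := by
  induction xs with
  | nil => rfl
  | cons x t ih =>
    simp only [List.findSome?_cons, h x (by simp)]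
    cases g x with
    | some b => rfl
    | none => exact ih (fun y hy => h y (by simp [hy]))

theorem pv_findSome?_filter {α β : Type} (xs : List α) (p : α → Bool) (f : α → Option β) :
    (xs.filter p).findSome? f = xs.findSome? (fun x => if p x then f x else none) := by
  induction xs with
  | nil => rfl
  | cons x t ih =>
    by_cases h : p x = true
    · simp [h, List.findSome?_cons, ih]
    · simp [h, ih]

theorem pv_findSome?_guard {α β : Type} (xs : List α) (p : α → Bool) (f : α → β) :
    xs.findSome? (fun x => if p x then some (f x) else none)
      = ((xs.filter p).head?).map f := by
  induction xs with
  | nil => rfl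
  | cons x t ih =>
    by_cases h : p x = true
    · simp [h]
    · simp [h, ih]

theorem pv_getD_map_range {β : Type} [Inhabited β] (n i : Nat) (f : Nat → β) (d : β) (hi : i < n) :
    (((List.range n).map f).getD i d) = f i := by
  simp [List.getD_eq_getElem?_getD, hi]

-- ---- low-level bit lemmas ----

-- index of the lowest set bit (0 for m = 0)
def pvLowIdx (m : Nat) : Nat :=
  if m = 0 then 0
  else if m % 2 = 1 then 0
  else pvLowIdx (m / 2) + 1
termination_by m
decreasing_by omega

theorem pv_low_testBit : ∀ m : Nat, m ≠ 0 → m.testBit (pvLowIdx m) = true := by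
  intro m
  induction m using Nat.strong_induction_on with
  | _ m ih =>
    intro hm
    unfold pvLowIdx
    by_cases h2 : m % 2 = 1
    · simp [hm, h2, Nat.testBit_zero]
    · have hq : m / 2 ≠ 0 := by omega
      simp only [hm, h2, if_false]
      rw [Nat.testBit_succ]
      exact ih (m / 2) (by omega) hq

theorem pv_low_min : ∀ m k : Nat, k < pvLowIdx m → m.testBit k = false := by
  intro m
  induction m using Nat.strong_induction_on with
  | _ m ih =>
    intro k hk
    by_cases hm : m = 0
    · simp [hm]
    by_cases h2 : m % 2 = 1
    · rw [pvLowIdx] at hk; simp [hm, h2] at hk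
    · rw [pvLowIdx] at hk
      simp only [hm, h2, if_false] at hk
      cases k with
      | zero => simp [Nat.testBit_zero]; omega
      | succ k' =>
        rw [Nat.testBit_succ]
        exact ih (m / 2) (by omega) k' (by omega)

theorem pv_two_pow_low_le (m : Nat) (hm : m ≠ 0) : 2 ^ pvLowIdx m ≤ m := by
  by_contra h
  have := Nat.testBit_lt_two_pow (x := m) (i := pvLowIdx m) (by omega)
  rw [pv_low_testBit m hm] at this
  exact Bool.noConfusion this

theorem pv_land_div2 (a b : Nat) : (a &&& b) / 2 = (a / 2) &&& (b / 2) := by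
  apply Nat.eq_of_testBit_eq
  intro k
  rw [← Nat.testBit_succ, Nat.testBit_land, Nat.testBit_succ, Nat.testBit_succ,
    ← Nat.testBit_land]

theorem pv_land_mod2_iff (a b : Nat) : (a &&& b) % 2 = 1 ↔ (a % 2 = 1 ∧ b % 2 = 1) := by
  have h := Nat.testBit_land a b 0
  simp only [Nat.testBit_zero] at h
  by_cases h1 : a % 2 = 1 <;> by_cases h2 : b % 2 = 1 <;>
    simp [h1, h2] at h ⊢

theorem pv_sub_land_testBit : ∀ a b k : Nat,
    (a - (a &&& b)).testBit k = (a.testBit k && !(b.testBit k)) := by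
  intro a
  induction a using Nat.strong_induction_on with
  | _ a ih =>
    intro b k
    by_cases ha : a = 0
    · simp [ha]
    have hland_le : a &&& b ≤ a := Nat.and_le_left
    have hdiv : (a &&& b) / 2 = (a / 2) &&& (b / 2) := pv_land_div2 a b
    have hmod := pv_land_mod2_iff a b
    have hle2 : (a / 2) &&& (b / 2) ≤ a / 2 := Nat.and_le_left
    have hdec : a - (a &&& b) = 2 * (a / 2 - ((a / 2) &&& (b / 2))) + (a % 2 - (a &&& b) % 2) := by
      omega
    rw [hdec]
    cases k with
    | zero =>
      simp only [Nat.testBit_zero]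
      have h2 : (2 * (a / 2 - ((a / 2) &&& (b / 2))) + (a % 2 - (a &&& b) % 2)) % 2
          = a % 2 - (a &&& b) % 2 := by omega
      rw [h2]
      have ha2 : a % 2 = 0 ∨ a % 2 = 1 := by omega
      have hb2 : b % 2 = 0 ∨ b % 2 = 1 := by omega
      rcases ha2 with h | h <;> rcases hb2 with h' | h' <;> simp [h, h'] <;> omega
    | succ k' =>
      rw [Nat.testBit_succ, Nat.testBit_succ, Nat.testBit_succ]
      have h2 : (2 * (a / 2 - ((a / 2) &&& (b / 2))) + (a % 2 - (a &&& b) % 2)) / 2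
          = a / 2 - ((a / 2) &&& (b / 2)) := by omega
      rw [h2]
      exact ih (a / 2) (by omega) (b / 2) k'

theorem pv_low_land : ∀ m : Nat, m ≠ 0 → m &&& (m - 1) = m - 2 ^ pvLowIdx m := by
  intro m
  induction m using Nat.strong_induction_on with
  | _ m ih =>
    intro hm
    by_cases h2 : m % 2 = 1
    · have hlow : pvLowIdx m = 0 := by rw [pvLowIdx]; simp [hm, h2]
      rw [hlow]
      apply Nat.eq_of_testBit_eq
      intro k
      simp only [pow_zero]
      cases k with
      | zero =>
        have h0 : (m - 1) % 2 = 0 := by omega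
        simp [Nat.testBit_zero, h0]
      | succ k' =>
        rw [Nat.testBit_succ, Nat.testBit_succ, pv_land_div2]
        have hd : (m - 1) / 2 = m / 2 := by omega
        rw [hd]
        have hself : (m / 2) &&& (m / 2) = m / 2 := by
          apply Nat.eq_of_testBit_eq
          intro k
          simp
        rw [hself]
    · have hq : m / 2 ≠ 0 := by omega
      have hlow : pvLowIdx m = pvLowIdx (m / 2) + 1 := by
        rw [pvLowIdx]; simp [hm, h2]
      have hpow_le : 2 ^ pvLowIdx (m / 2) ≤ m / 2 := pv_two_pow_low_le (m / 2) hq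
      have hih := ih (m / 2) (by omega) hq
      apply Nat.eq_of_testBit_eq
      intro k
      cases k with
      | zero =>
        have hz : (m &&& (m - 1)) % 2 = 0 := by
          have := pv_land_mod2_iff m (m - 1)
          omega
        have hr : (m - 2 ^ pvLowIdx m) % 2 = 0 := by
          rw [hlow, pow_succ]
          omega
        simp [Nat.testBit_zero, hz, hr]
      | succ k' =>
        rw [Nat.testBit_succ, Nat.testBit_succ, pv_land_div2]
        have hd1 : (m - 1) / 2 = m / 2 - 1 := by omega
        have hd2 : (m - 2 ^ pvLowIdx m) / 2 = m / 2 - 2 ^ pvLowIdx (m / 2) := by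
          rw [hlow, pow_succ]
          omega
        rw [hd1, hd2, hih]

theorem pv_low_sub (m : Nat) (hm : m ≠ 0) : m - (m &&& (m - 1)) = 2 ^ pvLowIdx m := by
  have h1 := pv_low_land m hm
  have h2 := pv_two_pow_low_le m hm
  have h3 : m &&& (m - 1) ≤ m - 1 := Nat.and_le_right
  omega

theorem pv_low_size (m : Nat) (hm : m ≠ 0) : (m - (m &&& (m - 1))).size - 1 = pvLowIdx m := by
  rw [pv_low_sub m hm, Nat.size_pow]
  omega

theorem pv_land_two_pow_self (m t : Nat) (h : m.testBit t = true) : m &&& 2 ^ t = 2 ^ t := by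
  apply Nat.eq_of_testBit_eq
  intro k
  by_cases hk : t = k
  · subst hk; simp [h]
  · simp [hk]

theorem pv_rest_testBit (m : Nat) (hm : m ≠ 0) (k : Nat) :
    (m &&& (m - 1)).testBit k = (m.testBit k && !(decide (k = pvLowIdx m))) := by
  have h1 : m &&& (m - 1) = m - (m &&& 2 ^ pvLowIdx m) := by
    rw [pv_land_two_pow_self m _ (pv_low_testBit m hm), pv_low_land m hm]
  rw [h1, pv_sub_land_testBit, Nat.testBit_two_pow]
  by_cases hk : k = pvLowIdx m
  · simp [hk]
  · have hk2 : ¬ (pvLowIdx m = k) := fun h => hk h.symm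
    simp [hk, hk2]

-- peeling the lowest set bit off a filtered range
theorem pv_filter_peel (p q : Nat → Bool) (t n : Nat) (ht : t < n) (hpt : p t = true)
    (hlow : ∀ k, k < t → p k = false) (hq : ∀ k, q k = (p k && !(decide (k = t)))) :
    (List.range n).filter p = t :: (List.range n).filter q := by
  have hsplit : List.range n = List.range' 0 t ++ List.range' t (n - t) := by
    have h1 : t + (n - t) = n := by omega
    rw [List.range_eq_range', ← h1, ← List.range'_append_1]
    simp
  have hcons : List.range' t (n - t) = t :: List.range' (t + 1) (n - t - 1) := by
    obtain ⟨d, hd⟩ : ∃ d, n - t = d + 1 := ⟨n - t - 1, by omega⟩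
    rw [hd, List.range'_succ]
    congr 1
  have hnil_p : (List.range' 0 t).filter p = [] := by
    rw [List.filter_eq_nil_iff]
    intro a ha
    have : a < t := by
      have := List.mem_range'_1.mp ha
      omega
    simp [hlow a this]
  have hnil_q : (List.range' 0 t).filter q = [] := by
    rw [List.filter_eq_nil_iff]
    intro a ha
    have : a < t := by
      have := List.mem_range'_1.mp ha
      omega
    simp [hq a, hlow a this]
  have htail : (List.range' (t + 1) (n - t - 1)).filter p
      = (List.range' (t + 1) (n - t - 1)).filter q := by
    apply List.filter_congr
    intro a ha
    have : t + 1 ≤ a := by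
      have := List.mem_range'_1.mp ha
      omega
    rw [hq a]
    have : ¬(a = t) := by omega
    simp [this]
  rw [hsplit, hcons, List.filter_append, List.filter_append, hnil_p, hnil_q]
  simp only [List.filter_cons, hq t, hpt]
  simp [htail]

-- the mask of row i has bit k iff k < n and matrix[i][k] == 1
theorem pv_mask_testBit (matrix : List (List Int)) (n i : Nat) : ∀ k,
    (pvMaskRow matrix n i).testBit k = (decide (k < n) && decide (pvGet matrix i k = 1)) := by
  unfold pvMaskRow
  induction n with
  | zero => intro k; simp
  | succ n ihn =>
    intro k
    rw [List.range_succ, List.foldl_append]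
    simp only [List.foldl_cons, List.foldl_nil]
    by_cases hc : pvGet matrix i n = 1
    · simp only [hc, if_true]
      rw [Nat.testBit_lor, ihn k, Nat.one_shiftLeft, Nat.testBit_two_pow]
      by_cases hk : k = n
      · subst hk; simp [hc]
      · have hk2 : ¬ (n = k) := fun h => hk h.symm
        by_cases hkn : k < n
        · simp [hk2, hkn, Nat.lt_succ_of_lt hkn]
        · have hkn1 : ¬ (k < n + 1) := by omega
          simp [hkn, hkn1, hk2]
    · simp only [hc, if_false]
      rw [ihn k]
      by_cases hkn : k < n
      · simp [hkn, Nat.lt_succ_of_lt hkn]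
      · by_cases hk : k = n
        · subst hk; simp [hc]
        · have : ¬ (k < n + 1) := by omega
          simp [hkn, this]

-- the B-side inner body, as a function of j
def pvInnerB (rows : List Nat) (i j : Nat) : Option (Int × Int) :=
  let c0 := rows.getD i 0 &&& rows.getD j 0
  let c := c0 - (c0 &&& ((1 <<< i) ||| (1 <<< j)))
  if c ≠ 0 then some (((i : Nat) : Int), (((c - (c &&& (c - 1))).size - 1 : Nat) : Int))
  else none

-- the while loop is a findSome? over the ascending list of set bits
theorem pv_scan_eq (rows : List Nat) (i n : Nat) : ∀ m : Nat,
    (∀ k, m.testBit k = true → k < n) →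
    pvBitLoop rows i m = ((List.range n).filter (fun k => m.testBit k)).findSome? (pvInnerB rows i) := by
  intro m
  induction m using Nat.strong_induction_on with
  | _ m ih =>
    intro hbnd
    by_cases hm : m = 0
    · subst hm
      rw [pvBitLoop]
      simp
    · have ht := pv_low_testBit m hm
      have htn : pvLowIdx m < n := hbnd _ ht
      have hpeel : (List.range n).filter (fun k => m.testBit k)
          = pvLowIdx m :: (List.range n).filter (fun k => (m &&& (m - 1)).testBit k) :=
        pv_filter_peel _ _ _ n htn ht (fun k hk => pv_low_min m k hk)
          (fun k => pv_rest_testBit m hm k)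
      rw [hpeel, List.findSome?_cons]
      rw [pvBitLoop]
      simp only [hm, dite_false]
      rw [pv_low_size m hm]
      unfold pvInnerB
      simp only []
      set c0 := rows.getD i 0 &&& rows.getD (pvLowIdx m) 0 with hc0
      set c := c0 - (c0 &&& ((1 <<< i) ||| (1 <<< pvLowIdx m))) with hc
      have hbnd' : ∀ k, (m &&& (m - 1)).testBit k = true → k < n := by
        intro k hk
        rw [pv_rest_testBit m hm k] at hk
        exact hbnd k (Bool.and_eq_true_iff.mp hk).1
      have hrest_lt : m &&& (m - 1) < m := by
        have : m &&& (m - 1) ≤ m - 1 := Nat.and_le_right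
        omega
      by_cases hcz : c ≠ 0
      · simp only [if_pos hcz]
      · simp only [if_neg hcz]
        rw [ih (m &&& (m - 1)) hrest_lt hbnd']
        rfl

-- ---- the pointwise equality of the two ports ----

theorem pv_eq_main (matrix : List (List Int)) :
    find_transitive_edges_matrix matrix = find_transitive_edges_matrix_alt matrix := by
  unfold find_transitive_edges_matrix find_transitive_edges_matrix_alt
  set n := matrix.length with hn
  have hrows : ∀ i, i < n →
      (((List.range n).map (pvMaskRow matrix n)).getD i 0) = pvMaskRow matrix n i :=
    fun i hi => pv_getD_map_range n i _ _ hi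
  have key : (List.range n).findSome? (fun i =>
      (List.range n).findSome? (fun j =>
        if pvGet matrix i j = 1 then
          (List.range n).findSome? (fun k =>
            if pvCondA matrix i j k then some ((i : Int), (k : Int)) else none)
        else none))
    = (List.range n).findSome? (fun i =>
      pvBitLoop ((List.range n).map (pvMaskRow matrix n)) i
        ((((List.range n).map (pvMaskRow matrix n)).getD i 0)
          - ((((List.range n).map (pvMaskRow matrix n)).getD i 0) &&& (1 <<< i)))) := by
    apply pv_findSome?_congr
    intro i hi
    have hin : i < n := List.mem_range.mp hi
    set rows := (List.range n).map (pvMaskRow matrix n) with hrowsdef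
    have hri : rows.getD i 0 = pvMaskRow matrix n i := hrows i hin
    -- bits of the initial loop value m0
    have hm0 : ∀ k, (rows.getD i 0 - (rows.getD i 0 &&& (1 <<< i))).testBit k
        = (decide (k < n) && decide (pvGet matrix i k = 1) && !(decide (k = i))) := by
      intro k
      rw [pv_sub_land_testBit, hri, pv_mask_testBit, Nat.one_shiftLeft, Nat.testBit_two_pow]
      by_cases hk : k = i
      · subst hk; simp
      · have hk2 : ¬ (i = k) := fun h => hk h.symm
        simp [hk, hk2]
    have hbnd : ∀ k, (rows.getD i 0 - (rows.getD i 0 &&& (1 <<< i))).testBit k = true → k < n := by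
      intro k hk
      rw [hm0 k] at hk
      rcases Bool.and_eq_true_iff.mp hk with ⟨h1, _⟩
      rcases Bool.and_eq_true_iff.mp h1 with ⟨h2, _⟩
      exact of_decide_eq_true h2
    rw [pv_scan_eq rows i n _ hbnd, pv_findSome?_filter]
    apply pv_findSome?_congr
    intro j hj
    have hjn : j < n := List.mem_range.mp hj
    have hrj : rows.getD j 0 = pvMaskRow matrix n j := hrows j hjn
    rw [hm0 j]
    by_cases hedge : pvGet matrix i j = 1
    · by_cases hij : j = i
      · -- A scans k but i = j kills pvCondA; B never visits j = i
        subst hij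
        simp only [hedge, decide_true, if_true]
        have hnone : ∀ k ∈ List.range n,
            (if pvCondA matrix j j k then some ((j : Int), (k : Int)) else none)
              = (none : Option (Int × Int)) := by
          intro k _
          simp [pvCondA]
        rw [pv_findSome?_congr _ _ _ hnone]
        simp
      · -- the real case: common-successor word vs A's k-scan
        simp only [hedge, hjn, decide_true, if_true]
        have hneq : (decide (j = i)) = false := by simp [hij]
        simp only [hneq, Bool.not_false, Bool.and_true, if_true]
        unfold pvInnerB
        simp only []
        set c0 := rows.getD i 0 &&& rows.getD j 0 with hc0def
        set c := c0 - (c0 &&& ((1 <<< i) ||| (1 <<< j))) with hcdef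
        have hcbit : ∀ k, c.testBit k = pvCondA matrix i j k ∨ (¬ k < n ∧ c.testBit k = false) := by
          intro k
          have h1 : c.testBit k = (c0.testBit k && !((1 <<< i) ||| (1 <<< j)).testBit k) :=
            pv_sub_land_testBit c0 _ k
          rw [h1, hc0def, Nat.testBit_land, hri, hrj, pv_mask_testBit, pv_mask_testBit,
            Nat.testBit_lor, Nat.one_shiftLeft, Nat.one_shiftLeft,
            Nat.testBit_two_pow, Nat.testBit_two_pow]
          by_cases hkn : k < n
          · left
            unfold pvCondA
            have hijne : i ≠ j := fun h => hij h.symm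
            by_cases hik : i = k <;> by_cases hjk : j = k <;>
              simp [hkn, hik, hjk, hijne, Bool.and_comm]
          · right
            refine ⟨hkn, ?_⟩
            simp [hkn]
        have hcbits : ∀ k, c.testBit k = (decide (k < n) && pvCondA matrix i j k) := by
          intro k
          rcases hcbit k with h | ⟨h1, h2⟩
          · by_cases hkn : k < n
            · simp [hkn, h]
            · -- k ≥ n: c has no such bit (c ⊆ rows i, whose bits are < n)
              have : c.testBit k = false := by
                have hc0b : c0.testBit k = false := by
                  rw [hc0def, Nat.testBit_land, hri, pv_mask_testBit]
                  simp [hkn]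
                have := pv_sub_land_testBit c0 ((1 <<< i) ||| (1 <<< j)) k
                rw [hc0b] at this
                simpa using this
              simp [hkn, this]
          · simp [h1, h2]
        have hfilter : (List.range n).filter (fun k => pvCondA matrix i j k)
            = (List.range n).filter (fun k => c.testBit k) := by
          apply (List.filter_congr _).symm
          intro k hk
          rw [hcbits k]
          simp [List.mem_range.mp hk]
        rw [pv_findSome?_guard, hfilter]
        by_cases hcz : c = 0
        · have : (List.range n).filter (fun k => c.testBit k) = [] := by
            rw [List.filter_eq_nil_iff]
            intro a _
            simp [hcz]
          rw [this]
          simp [hcz]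
        · have hlt := pv_low_testBit c hcz
          have hltn : pvLowIdx c < n := by
            have := hcbits (pvLowIdx c)
            rw [hlt] at this
            by_contra h
            simp [h] at this
          have hpeel : (List.range n).filter (fun k => c.testBit k)
              = pvLowIdx c :: (List.range n).filter (fun k => (c &&& (c - 1)).testBit k) :=
            pv_filter_peel _ _ _ n hltn hlt (fun k hk => pv_low_min c k hk)
              (fun k => pv_rest_testBit c hcz k)
          rw [hpeel]
          simp only [List.head?_cons, Option.map_some]
          rw [if_pos hcz, pv_low_size c hcz]
    · -- matrix[i][j] != 1: both sides yield none for this j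
      simp [hedge]
  simp only [key]

-- ===== VERDICT (by name: the statement is the Claim_ definition above) =====
theorem find_transitive_edges_matrix_spec : Claim_equal_find_transitive_edges_matrix := by
  intro matrix _ _
  unfold Spec_find_transitive_edges_matrix
  exact pv_eq_main matrix
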